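-- pv_equiv track=rewrite | github.com/vltanh/network-generation | tools/viz_check/ec_sbm/kernel_check.py | assert_simple_graph
-- ===== SOURCE A (Python) =====
-- def assert_simple_graph(edges: list[tuple]) -> tuple[int, int]:
--     """Return (parallels, loops). Both must be 0 for a simple graph."""
--     seen = set()
--     parallels = 0
--     loops = 0
--     for u, v in edges:
--         if u == v: loops += 1
--         key = (u, v) if u <= v else (v, u)
--         if key in seen: parallels += 1
--         else: seen.add(key)
--     return parallels, loops
-- ===== SOURCE B (Python) =====
-- def assert_simple_graph(edges: list[tuple]) -> tuple[int, int]: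
--     """Return (parallels, loops). Both must be 0 for a simple graph."""
--     keys = sorted((u, v) if u <= v else (v, u) for (u, v) in edges)
--     # after sorting, every copy of a key beyond its first is adjacent to an equal key
--     parallels = sum(1 for a, b in zip(keys, keys[1:]) if a == b)
--     loops = sum(1 for (u, v) in edges if u == v)
--     return parallels, loops
-- ===== Notes on version B (the rewrite author's own statement) =====
-- stated objective: alternative
-- what changed: Replaces A's one-pass hash-set membership scan by sort-then-scan: sort the normalized keys and count adjacent equal neighbours (each duplicate past the first is adjacent to an equal key after sorting); loops counted in a separate pass.
import Mathlib
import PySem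

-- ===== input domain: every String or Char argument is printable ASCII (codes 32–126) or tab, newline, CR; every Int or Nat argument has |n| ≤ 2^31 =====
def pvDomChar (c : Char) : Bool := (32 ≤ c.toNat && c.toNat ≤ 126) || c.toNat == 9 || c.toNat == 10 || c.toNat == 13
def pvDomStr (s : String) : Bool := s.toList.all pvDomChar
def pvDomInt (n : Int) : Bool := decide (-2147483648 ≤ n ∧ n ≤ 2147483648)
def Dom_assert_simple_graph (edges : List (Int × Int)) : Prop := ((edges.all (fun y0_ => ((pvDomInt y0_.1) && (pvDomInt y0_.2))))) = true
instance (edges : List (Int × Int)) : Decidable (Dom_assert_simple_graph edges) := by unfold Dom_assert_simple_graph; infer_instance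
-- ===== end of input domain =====

-- B replaces A's one-pass hash-set scan by sort-then-scan over the normalized keys (objective: alternative).

-- ===== PORT A =====
-- one pass, state (seen, parallels, loops), exactly A's branch order
def assert_simple_graph (edges : List (Int × Int)) : Int × Int :=
  let st := edges.foldl
    (fun (st : PySem.Set (Int × Int) × Int × Int) uv =>
      let seen := st.1
      let parallels := st.2.1
      let loops := st.2.2
      let loops := if uv.1 == uv.2 then loops + 1 else loops
      let key := if uv.1 ≤ uv.2 then (uv.1, uv.2) else (uv.2, uv.1)
      if PySem.Set.contains seen key then (seen, parallels + 1, loops)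
      else (PySem.Set.add seen key, parallels, loops))
    (PySem.Set.empty, 0, 0)
  (st.2.1, st.2.2)

-- ===== PORT B =====
-- sorted(list of int pairs): key into Int ×ₗ Int, whose < is Python's lexicographic tuple <, so this is exact;
-- zip(keys, keys[1:]) is keys.zip (keys.drop 1).
def assert_simple_graph_alt (edges : List (Int × Int)) : Int × Int :=
  let keys := PySem.List.sorted
      (edges.map (fun uv => if uv.1 ≤ uv.2 then (uv.1, uv.2) else (uv.2, uv.1)))
      (fun p => (toLex p : Int ×ₗ Int)) false
  let parallels : Int := (((keys.zip (keys.drop 1)).filter (fun ab => ab.1 == ab.2)).length : Int)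
  let loops : Int := ((edges.filter (fun uv => uv.1 == uv.2)).length : Int)
  (parallels, loops)

-- ===== PRECONDITION & SPEC =====
def Spec_assert_simple_graph (edges : List (Int × Int)) (out : Int × Int) : Prop := out = assert_simple_graph_alt edges
instance (edges : List (Int × Int)) (out : Int × Int) : Decidable (Spec_assert_simple_graph edges out) := by unfold Spec_assert_simple_graph; infer_instance

-- ===== CLAIM (what is proved, stated in full; the proofs are below) =====
def Claim_equal_assert_simple_graph : Prop := ∀ (edges : List (Int × Int)), Dom_assert_simple_graph edges → Spec_assert_simple_graph edges (assert_simple_graph edges)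

-- ===== LEMMAS AND PROOFS =====

-- characterization of A's fold from an arbitrary state
theorem assert_simple_graph_fold (es : List (Int × Int))
    (s : PySem.Set (Int × Int)) (p l : Int) :
    es.foldl
      (fun (st : PySem.Set (Int × Int) × Int × Int) uv =>
        let seen := st.1
        let parallels := st.2.1
        let loops := st.2.2
        let loops := if uv.1 == uv.2 then loops + 1 else loops
        let key := if uv.1 ≤ uv.2 then (uv.1, uv.2) else (uv.2, uv.1)
        if PySem.Set.contains seen key then (seen, parallels + 1, loops)
        else (PySem.Set.add seen key, parallels, loops))
      (s, p, l)
    = (PySem.Set.update s (es.map (fun uv => if uv.1 ≤ uv.2 then (uv.1, uv.2) else (uv.2, uv.1))),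
       p + (es.length : Int)
         - (((PySem.Set.update s (es.map (fun uv => if uv.1 ≤ uv.2 then (uv.1, uv.2) else (uv.2, uv.1)))).length : Int)
            - (s.length : Int)),
       l + ((es.filter (fun uv => uv.1 == uv.2)).length : Int)) := by
  induction es generalizing s p l with
  | nil => simp [PySem.Set.update]
  | cons e es ih =>
    simp only [List.foldl_cons, List.map_cons, List.filter_cons]
    by_cases hc : PySem.Set.contains s (if e.1 ≤ e.2 then (e.1, e.2) else (e.2, e.1)) = true
    · have hm : (if e.1 ≤ e.2 then (e.1, e.2) else (e.2, e.1)) ∈ s :=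
        (PySem.Set.contains_iff _ _).mp hc
      have hadd : PySem.Set.add s (if e.1 ≤ e.2 then (e.1, e.2) else (e.2, e.1)) = s := by
        simp [PySem.Set.add, hm]
      simp only [hc, if_true]
      rw [ih]
      have hupd : PySem.Set.update s ((if e.1 ≤ e.2 then (e.1, e.2) else (e.2, e.1)) ::
          es.map (fun uv => if uv.1 ≤ uv.2 then (uv.1, uv.2) else (uv.2, uv.1)))
          = PySem.Set.update s (es.map (fun uv => if uv.1 ≤ uv.2 then (uv.1, uv.2) else (uv.2, uv.1))) := by
        simp [PySem.Set.update, hadd]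
      rw [hupd]
      simp only [Prod.mk.injEq]
      refine ⟨trivial, by push_cast [List.length_cons]; ring, ?_⟩
      by_cases he : e.1 == e.2 <;> simp [he] <;> ring
    · have hm : (if e.1 ≤ e.2 then (e.1, e.2) else (e.2, e.1)) ∉ s :=
        fun h => hc ((PySem.Set.contains_iff _ _).mpr h)
      have hlen : (PySem.Set.add s (if e.1 ≤ e.2 then (e.1, e.2) else (e.2, e.1))).length = s.length + 1 := by
        simp [PySem.Set.add, hm]
      simp only [Bool.not_eq_true] at hc
      simp only [hc, Bool.false_eq_true, if_false]
      rw [ih]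
      have hupd : PySem.Set.update s ((if e.1 ≤ e.2 then (e.1, e.2) else (e.2, e.1)) ::
          es.map (fun uv => if uv.1 ≤ uv.2 then (uv.1, uv.2) else (uv.2, uv.1)))
          = PySem.Set.update (PySem.Set.add s (if e.1 ≤ e.2 then (e.1, e.2) else (e.2, e.1)))
              (es.map (fun uv => if uv.1 ≤ uv.2 then (uv.1, uv.2) else (uv.2, uv.1))) := by
        simp [PySem.Set.update]
      rw [hupd]
      simp only [Prod.mk.injEq]
      refine ⟨trivial, by rw [hlen]; push_cast [List.length_cons]; ring, ?_⟩
      by_cases he : e.1 == e.2 <;> simp [he] <;> ring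

-- a nodup list with the same members as l has length l.toFinset.card
theorem nodup_length_eq_toFinset_card {α : Type} [DecidableEq α]
    (s l : List α) (hnd : s.Nodup) (hmem : ∀ x, x ∈ s ↔ x ∈ l) :
    s.length = l.toFinset.card := by
  have : s.toFinset = l.toFinset := by
    ext x; simp [hmem x]
  rw [← this, List.toFinset_card_of_nodup hnd]

-- adjacent-equal count in a lex-sorted list + distinct count = length
theorem adj_count_sorted (l : List (Int × Int))
    (hp : l.Pairwise (fun a b => (toLex a : Int ×ₗ Int) ≤ toLex b)) :
    ((l.zip (l.drop 1)).filter (fun ab => ab.1 == ab.2)).length + l.toFinset.card = l.length := by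
  induction l with
  | nil => simp
  | cons a t ih =>
    cases t with
    | nil => simp
    | cons b t =>
      have hab : (toLex a : Int ×ₗ Int) ≤ toLex b := (List.pairwise_cons.mp hp).1 b (by simp)
      have hpt : (b :: t).Pairwise (fun x y => (toLex x : Int ×ₗ Int) ≤ toLex y) :=
        (List.pairwise_cons.mp hp).2
      have ih' := ih hpt
      simp only [List.drop_one, List.tail_cons, List.zip_cons_cons, List.filter_cons] at ih' ⊢
      by_cases he : a = b
      · subst he
        simp only [beq_self_eq_true, if_true, List.length_cons, List.toFinset_cons,
          Finset.insert_idem]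
        simp only [List.length_cons, List.toFinset_cons] at ih'
        omega
      · have hnm : a ∉ b :: t := by
          intro hx
          rcases List.mem_cons.mp hx with h | hx'
          · exact he h
          · have hba := (List.pairwise_cons.mp hpt).1 a hx'
            exact he (toLex.injective (le_antisymm hab hba))
        have hbeq : (a == b) = false := by simp [he]
        simp only [hbeq, Bool.false_eq_true, if_false, List.length_cons, List.toFinset_cons]
        rw [Finset.card_insert_of_notMem (by simpa using hnm)]
        simp only [List.length_cons, List.toFinset_cons] at ih'
        omega

-- ===== VERDICT (by name: the statement is the Claim_ definition above) =====
theorem assert_simple_graph_spec : Claim_equal_assert_simple_graph := by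
  intro edges _
  show _ = _
  unfold assert_simple_graph assert_simple_graph_alt
  rw [assert_simple_graph_fold]
  set ks := edges.map (fun uv => if uv.1 ≤ uv.2 then (uv.1, uv.2) else (uv.2, uv.1)) with hks
  set srt := PySem.List.sorted ks (fun p => (toLex p : Int ×ₗ Int)) false with hsrt
  have hperm : srt.Perm ks := by
    rw [hsrt]; exact PySem.List.sorted_perm ks (fun p => (toLex p : Int ×ₗ Int)) false
  have hlen : srt.length = ks.length := hperm.length_eq
  have hpair : srt.Pairwise (fun a b => (toLex a : Int ×ₗ Int) ≤ toLex b) := by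
    rw [hsrt]; exact PySem.List.sorted_pairwise ks (fun p => (toLex p : Int ×ₗ Int))
  have hadj := adj_count_sorted srt hpair
  have hfin : srt.toFinset = ks.toFinset := by
    ext x; simp [List.mem_toFinset, hperm.mem_iff]
  rw [hfin] at hadj
  have hofl : PySem.Set.update PySem.Set.empty ks = PySem.Set.ofList ks := by
    simp [PySem.Set.ofList_eq_foldl, PySem.Set.update, PySem.Set.empty]
  have hupd : (PySem.Set.update PySem.Set.empty ks).length = ks.toFinset.card := by
    rw [hofl]
    apply nodup_length_eq_toFinset_card
    · exact PySem.Set.nodup_ofList ks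
    · intro x; exact PySem.Set.mem_ofList ks x
  have hklen : ks.length = edges.length := by simp [hks]
  simp only [Prod.mk.injEq]
  constructor
  · rw [hupd]
    simp only [PySem.Set.empty, List.length_nil]
    omega
  · omega
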